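-- pv_equiv track=rewrite | github.com/heitorchang/learn-code | battles/skilltest/nearestGreater.py | buildNeighborList
-- ===== SOURCE A (Python) =====
-- def buildNeighborList(idx, lstLen):
--     longest = max(lstLen - idx - 1, idx)
--     result = []
--     for i in range(1, longest + 1):
--         plus = i
--         minus = -i
--
--         if idx + minus >= 0:
--             result.append(idx + minus)
--         if idx + plus < lstLen:
--             result.append(idx + plus)
--     return result
-- ===== SOURCE B (Python) =====
-- def buildNeighborList(idx, lstLen):
--     left = list(range(idx - 1, -1, -1))
--     right = list(range(idx + 1, lstLen))
--     k = min(len(left), len(right))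
--     out = [x for pair in zip(left, right) for x in pair]
--     return out + left[k:] + right[k:]
-- ===== Notes on version B (the rewrite author's own statement) =====
-- stated objective: alternative
-- what changed: B builds the two neighbor sides as explicit range lists and interleaves them with zip plus leftover slices, instead of A's counted loop with per-distance bound checks.
import Mathlib
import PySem

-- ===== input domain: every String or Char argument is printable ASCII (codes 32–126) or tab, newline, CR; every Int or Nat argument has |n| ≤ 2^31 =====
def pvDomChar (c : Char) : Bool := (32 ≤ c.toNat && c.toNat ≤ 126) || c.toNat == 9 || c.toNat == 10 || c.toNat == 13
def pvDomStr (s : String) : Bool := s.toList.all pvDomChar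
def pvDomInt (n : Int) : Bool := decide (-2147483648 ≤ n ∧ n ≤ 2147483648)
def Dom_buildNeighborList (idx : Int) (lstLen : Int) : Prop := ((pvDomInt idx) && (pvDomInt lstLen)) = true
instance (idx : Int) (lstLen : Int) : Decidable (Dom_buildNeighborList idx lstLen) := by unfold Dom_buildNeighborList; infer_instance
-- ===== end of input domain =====

-- B replaces A's counted loop with bound checks by two explicit range lists
-- interleaved via zip plus leftover slices (alternative decomposition, same cost).

-- ===== PORT A =====
def buildNeighborList (idx : Int) (lstLen : Int) : List Int :=
  let longest := max (lstLen - idx - 1) idx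
  (PySem.List.pyRange 1 (longest + 1) 1).foldl
    (fun result i =>
      let plus := i
      let minus := -i
      let result := if idx + minus ≥ 0 then result ++ [idx + minus] else result
      if idx + plus < lstLen then result ++ [idx + plus] else result)
    []

-- ===== PORT B =====
def buildNeighborList_alt (idx : Int) (lstLen : Int) : List Int :=
  let left := PySem.List.pyRange (idx - 1) (-1) (-1)
  let right := PySem.List.pyRange (idx + 1) lstLen 1
  let k := min left.length right.length
  let out := (left.zip right).flatMap (fun p => [p.1, p.2])
  out ++ left.drop k ++ right.drop k

-- ===== PRECONDITION & SPEC =====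
def Spec_buildNeighborList (idx : Int) (lstLen : Int) (out : List Int) : Prop := out = buildNeighborList_alt idx lstLen
instance (idx : Int) (lstLen : Int) (out : List Int) : Decidable (Spec_buildNeighborList idx lstLen out) := by unfold Spec_buildNeighborList; infer_instance

-- ===== CLAIM (what is proved, stated in full; the proofs are below) =====
def Claim_equal_buildNeighborList : Prop := ∀ (idx : Int) (lstLen : Int), Dom_buildNeighborList idx lstLen → Spec_buildNeighborList idx lstLen (buildNeighborList idx lstLen)

-- ===== LEMMAS AND PROOFS =====

-- flatMap congruence over members (used to drop guards that hold on the range)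
theorem pv_flatMap_congr {a b : Type} (l : List a) (f g : a → List b)
    (h : ∀ x ∈ l, f x = g x) : l.flatMap f = l.flatMap g := by
  induction l with
  | nil => rfl
  | cons x xs ih =>
    simp only [List.flatMap_cons]
    rw [h x (by simp), ih (fun y hy => h y (by simp [hy]))]

theorem pv_flatMap_single {a b : Type} (f : a → b) (l : List a) :
    l.flatMap (fun x => [f x]) = l.map f := by
  induction l with
  | nil => rfl
  | cons x xs ih => simp [ih]

-- interleaving over Nat ranges: flatMap over range (max n m) with per-side guards
-- equals zip-interleave of the two mapped ranges plus the leftover tails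
theorem pv_main (n : Nat) : ∀ (m : Nat) (l r : Nat → Int),
    (List.range (max n m)).flatMap
      (fun k => (if k < n then [l k] else []) ++ (if k < m then [r k] else []))
    = ((((List.range n).map l).zip ((List.range m).map r)).flatMap fun p => [p.1, p.2])
      ++ ((List.range n).map l).drop (min n m) ++ ((List.range m).map r).drop (min n m) := by
  induction n with
  | zero =>
    intro m l r
    have hf : (fun k => (if k < 0 then [l k] else []) ++ if k < m then [r k] else [])
        = fun k => if k < m then [r k] else [] := by
      funext k; simp
    rw [Nat.max_eq_right (Nat.zero_le m), hf,
      pv_flatMap_congr _ _ (fun k => [r k]) (by intro x hx; simp [List.mem_range.mp hx]),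
      pv_flatMap_single]
    simp
  | succ n ih =>
    intro m l r
    cases m with
    | zero =>
      have hf : (fun k => (if k < n + 1 then [l k] else []) ++ if k < 0 then [r k] else [])
          = fun k => if k < n + 1 then [l k] else [] := by
        funext k; simp
      rw [Nat.max_eq_left (Nat.zero_le (n + 1)), hf,
        pv_flatMap_congr _ _ (fun k => [l k]) (by intro x hx; simp [List.mem_range.mp hx]),
        pv_flatMap_single]
      simp
    | succ m =>
      have hmax : max (n + 1) (m + 1) = max n m + 1 := by omega
      have hmin : min (n + 1) (m + 1) = min n m + 1 := by omega
      rw [hmax, hmin, List.range_succ_eq_map, List.range_succ_eq_map, List.range_succ_eq_map]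
      simp only [List.flatMap_cons, List.flatMap_map, List.map_cons, List.map_map,
        List.zip_cons_cons, List.drop_succ_cons, Function.comp_def, Nat.succ_eq_add_one,
        Nat.add_lt_add_iff_right, Nat.zero_lt_succ, if_true]
      rw [ih m (fun k => l (k + 1)) (fun k => r (k + 1))]
      simp

-- A's loop with its two conditional appends equals one flatMap of two-piece chunks
theorem pv_foldl_chunks (idx lstLen : Int) : ∀ (l : List Int) (acc : List Int),
    l.foldl (fun result i =>
        if idx + i < lstLen then (if idx + -i ≥ 0 then result ++ [idx + -i] else result) ++ [idx + i]
        else if idx + -i ≥ 0 then result ++ [idx + -i] else result) acc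
    = acc ++ l.flatMap (fun i =>
        (if 0 ≤ idx + -i then [idx + -i] else []) ++ (if idx + i < lstLen then [idx + i] else [])) := by
  intro l
  induction l with
  | nil => intro acc; simp
  | cons x xs ih =>
    intro acc
    simp only [List.foldl_cons, List.flatMap_cons, ge_iff_le]
    rw [ih]
    split_ifs <;> simp

theorem buildNeighborList_spec' (idx lstLen : Int) :
    buildNeighborList idx lstLen = buildNeighborList_alt idx lstLen := by
  unfold buildNeighborList buildNeighborList_alt
  simp only []
  rw [pv_foldl_chunks, List.nil_append]
  have hleft : idx - 1 - (-1) = idx := by ring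
  rw [PySem.List.pyRange_neg_one, hleft,
    PySem.List.pyRange_one (idx + 1) lstLen,
    show (lstLen - (idx + 1)).toNat = (lstLen - idx - 1).toNat from by omega,
    PySem.List.pyRange_one 1 (max (lstLen - idx - 1) idx + 1)]
  have hlen : (max (lstLen - idx - 1) idx + 1 - 1).toNat
      = max (idx.toNat) ((lstLen - idx - 1).toNat) := by
    rcases le_total (lstLen - idx - 1) idx with h | h
    · rw [max_eq_right h, max_eq_left (by omega : (lstLen - idx - 1).toNat ≤ idx.toNat)]
      omega
    · rw [max_eq_left h, max_eq_right (by omega : idx.toNat ≤ (lstLen - idx - 1).toNat)]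
      omega
  rw [hlen, List.flatMap_map]
  have hfun : (fun a : Nat => (if 0 ≤ idx + -(1 + (a : Int)) then [idx + -(1 + (a : Int))] else [])
        ++ (if idx + (1 + (a : Int)) < lstLen then [idx + (1 + (a : Int))] else []))
      = (fun k : Nat => (if k < idx.toNat then [idx - 1 - (k : Int)] else [])
          ++ (if k < (lstLen - idx - 1).toNat then [idx + 1 + (k : Int)] else [])) := by
    funext k
    have e1 : idx + -(1 + (k : Int)) = idx - 1 - (k : Int) := by ring
    have e2 : idx + (1 + (k : Int)) = idx + 1 + (k : Int) := by ring
    rw [e1, e2]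
    split_ifs <;> first | rfl | (exfalso; omega)
  rw [hfun, pv_main]
  simp

-- ===== VERDICT (by name: the statement is the Claim_ definition above) =====
theorem buildNeighborList_spec : Claim_equal_buildNeighborList := by
  intro idx lstLen _
  unfold Spec_buildNeighborList
  exact buildNeighborList_spec' idx lstLen
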